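-- pv_equiv track=rewrite | github.com/jeffrylew/lc-crash-course | greedy/how_many_apples_can_you_put_into_the_basket.py | maxNumberOfApplesDS1
-- ===== SOURCE A (Python) =====
-- def maxNumberOfApplesDS1(weight: list[int]) -> int:
--     weight.sort()
--     apples = units = 0
--
--     for ele in weight:
--         units += ele
--
--         if units > 5000:
--             break
--
--         apples += 1
--
--     return apples
-- ===== SOURCE B (Python) =====
-- def maxNumberOfApplesDS1(weight: list[int]) -> int:
--     # Count-compress, then consume whole groups of equal weights ascending.
--     # (Return-value equivalent to A; unlike A it does not sort `weight` in place.)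
--     counts = {}
--     for w in weight:
--         counts[w] = counts.get(w, 0) + 1
--     apples = units = 0
--     for w in sorted(counts):
--         c = counts[w]
--         if w <= 0:
--             apples += c
--             units += w * c
--         else:
--             t = min(c, (5000 - units) // w)
--             if t < c:
--                 return apples + t
--             apples += c
--             units += w * c
--     return apples
-- ===== Notes on version B (the rewrite author's own statement) =====
-- stated objective: alternative
-- what changed: A sorts the whole list and walks it element by element; B builds a weight->count dictionary in one pass, sorts only the distinct weights, and consumes each equal-weight group in a single batched step (capacity // weight), so the sort is over distinct values only.
import Mathlib
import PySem

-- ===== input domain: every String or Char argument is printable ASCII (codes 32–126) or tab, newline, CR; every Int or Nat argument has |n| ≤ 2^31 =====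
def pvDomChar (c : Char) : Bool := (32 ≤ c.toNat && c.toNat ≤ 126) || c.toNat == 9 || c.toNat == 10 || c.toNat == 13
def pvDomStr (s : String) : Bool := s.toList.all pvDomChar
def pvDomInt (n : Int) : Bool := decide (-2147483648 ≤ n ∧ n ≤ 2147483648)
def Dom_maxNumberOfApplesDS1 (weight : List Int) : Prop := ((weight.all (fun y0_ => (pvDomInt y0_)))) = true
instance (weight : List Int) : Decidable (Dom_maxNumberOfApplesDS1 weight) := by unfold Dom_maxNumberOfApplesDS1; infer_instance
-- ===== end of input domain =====

-- B replaces A's full sort + element-by-element walk by a count dictionary plus a sort of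
-- the distinct weights only, consuming each equal-weight group in one batched step;
-- equivalence is about the RETURN value only (Python A sorts `weight` in place, B does not).

-- ===== PORT A =====
-- A's for-loop with its `break`: state (apples, units)
def pvALoop : List Int → Int → Int → Int
  | [], apples, _ => apples
  | e :: rest, apples, units =>
    let units' := units + e
    if units' > 5000 then apples
    else pvALoop rest (apples + 1) units'

def maxNumberOfApplesDS1 (weight : List Int) : Int :=
  pvALoop (PySem.List.sorted weight (fun x => x) false) 0 0

-- ===== PORT B =====
-- B's second for-loop with its early `return`: state (apples, units)
def pvBLoop (counts : PySem.Dict Int Int) : List Int → Int → Int → Int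
  | [], apples, _ => apples
  | w :: rest, apples, units =>
    let c := counts.getD w 0   -- counts[w]; every iterated w is a key, so getD never defaults
    if w ≤ 0 then pvBLoop counts rest (apples + c) (units + w * c)
    else
      let t := min c (PySem.Int.floordiv (5000 - units) w)
      if t < c then apples + t
      else pvBLoop counts rest (apples + c) (units + w * c)

def maxNumberOfApplesDS1_alt (weight : List Int) : Int :=
  let counts := weight.foldl (fun d x => d.insert x (d.getD x 0 + 1)) PySem.Dict.empty
  pvBLoop counts (PySem.List.sorted counts.keys (fun x => x) false) 0 0

-- ===== PRECONDITION & SPEC =====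
def Spec_maxNumberOfApplesDS1 (weight : List Int) (out : Int) : Prop := out = maxNumberOfApplesDS1_alt weight
instance (weight : List Int) (out : Int) : Decidable (Spec_maxNumberOfApplesDS1 weight out) := by unfold Spec_maxNumberOfApplesDS1; infer_instance

-- ===== CLAIM (what is proved, stated in full; the proofs are below) =====
def Claim_equal_maxNumberOfApplesDS1 : Prop := ∀ (weight : List Int), Dom_maxNumberOfApplesDS1 weight → Spec_maxNumberOfApplesDS1 weight (maxNumberOfApplesDS1 weight)

-- ===== LEMMAS AND PROOFS =====

-- One positive-weight group of size n, walked element by element by A's loop: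
-- it takes min(n, (5000-units)//w) items and breaks iff it cannot take all n.
theorem pvALoop_replicate_pos (w : Int) (hw : 0 < w) (n : Nat) :
    ∀ (rest : List Int) (apples units : Int), units ≤ 5000 →
      pvALoop (List.replicate n w ++ rest) apples units =
        (if (n : Int) ≤ PySem.Int.floordiv (5000 - units) w
         then pvALoop rest (apples + n) (units + w * n)
         else apples + PySem.Int.floordiv (5000 - units) w) := by
  induction n with
  | zero =>
    intro rest apples units hu
    have h0 : (0:Int) ≤ PySem.Int.floordiv (5000 - units) w :=
      (PySem.Int.le_floordiv_iff_mul_le hw).2 (by nlinarith)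
    simp [h0]
  | succ n ih =>
    intro rest apples units hu
    rw [List.replicate_succ, List.cons_append]
    by_cases hbr : units + w > 5000
    · have hq : PySem.Int.floordiv (5000 - units) w = 0 :=
        (PySem.Int.floordiv_eq_iff_of_pos hw).2 (by constructor <;> nlinarith)
      simp only [pvALoop, if_pos hbr, hq]
      have : ¬ ((n:Int) + 1 ≤ 0) := by omega
      simp [this]
    · have hle : units + w ≤ 5000 := by omega
      simp only [pvALoop, if_neg hbr]
      rw [ih rest (apples + 1) (units + w) hle]
      have hq : PySem.Int.floordiv (5000 - units) w
          = PySem.Int.floordiv (5000 - (units + w)) w + 1 := by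
        have h := (PySem.Int.floordiv_eq_iff_of_pos hw).1
          (rfl : PySem.Int.floordiv (5000 - (units + w)) w = _)
        rcases h with ⟨h1, h2⟩
        exact (PySem.Int.floordiv_eq_iff_of_pos hw).2 ⟨by nlinarith, by nlinarith⟩
      rw [hq]
      push_cast
      by_cases hc : (n:Int) ≤ PySem.Int.floordiv (5000 - (units + w)) w
      · rw [if_pos hc, if_pos (by omega)]
        ring_nf
      · rw [if_neg hc, if_neg (by omega)]
        ring

-- A nonpositive-weight group never triggers the break.
theorem pvALoop_replicate_nonpos (w : Int) (hw : w ≤ 0) (n : Nat) :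
    ∀ (rest : List Int) (apples units : Int), units ≤ 5000 →
      pvALoop (List.replicate n w ++ rest) apples units =
        pvALoop rest (apples + n) (units + w * n) := by
  induction n with
  | zero => intro rest apples units _; simp
  | succ n ih =>
    intro rest apples units hu
    rw [List.replicate_succ, List.cons_append]
    have hle : ¬ (units + w > 5000) := by omega
    simp only [pvALoop, if_neg hle]
    rw [ih rest (apples + 1) (units + w) (by omega)]
    push_cast
    ring_nf

-- A's walk over the grouped list equals B's batched loop over the distinct weights.
theorem pvLoop_eq (cnt : Int → Int) (counts : PySem.Dict Int Int)
    (hc : ∀ w, counts.getD w 0 = cnt w) :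
    ∀ (ks : List Int) (apples units : Int), (∀ w ∈ ks, 0 ≤ cnt w) → units ≤ 5000 →
      pvALoop (ks.flatMap (fun w => List.replicate (cnt w).toNat w)) apples units =
        pvBLoop counts ks apples units := by
  intro ks
  induction ks with
  | nil => intro apples units _ _; simp [pvALoop, pvBLoop]
  | cons w ks ih =>
    intro apples units hnn hu
    have hw0 : 0 ≤ cnt w := hnn w (by simp)
    have hcast : ((cnt w).toNat : Int) = cnt w := Int.toNat_of_nonneg hw0
    rw [List.flatMap_cons]
    by_cases hw : w ≤ 0
    · rw [pvALoop_replicate_nonpos w hw _ _ _ _ hu, hcast]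
      rw [ih _ _ (fun v hv => hnn v (by simp [hv])) (by nlinarith)]
      simp only [pvBLoop, hc, if_pos hw]
    · have hwpos : 0 < w := by omega
      rw [pvALoop_replicate_pos w hwpos _ _ _ _ hu, hcast]
      set q := PySem.Int.floordiv (5000 - units) w with hqdef
      have hqw : q * w ≤ 5000 - units ∧ 5000 - units < (q + 1) * w :=
        (PySem.Int.floordiv_eq_iff_of_pos hwpos).1 rfl
      by_cases hcq : cnt w ≤ q
      · rw [if_pos hcq]
        rw [ih _ _ (fun v hv => hnn v (by simp [hv])) (by nlinarith)]
        simp only [pvBLoop, hc, if_neg hw, ← hqdef]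
        rw [min_eq_left hcq, if_neg (lt_irrefl _)]
      · rw [if_neg hcq]
        simp only [pvBLoop, hc, if_neg hw, ← hqdef]
        rw [min_eq_right (by omega), if_pos (by omega)]

-- Multiplicities in a flatMap of replicates over a duplicate-free key list.
theorem pvCount_flat (f : Int → Nat) (v : Int) :
    ∀ (ks : List Int), ks.Nodup →
      (ks.flatMap (fun w => List.replicate (f w) w)).count v
        = if v ∈ ks then f v else 0 := by
  intro ks
  induction ks with
  | nil => simp
  | cons w ks ih =>
    intro hnd
    rw [List.flatMap_cons, List.count_append, List.count_replicate,
      ih hnd.of_cons]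
    rcases List.nodup_cons.1 hnd with ⟨hw, _⟩
    by_cases hv : v = w
    · subst hv; simp [hw]
    · simp only [List.mem_cons, hv, false_or]
      split_ifs with h
      all_goals first
        | exact absurd (beq_iff_eq.1 h) (fun hh => hv hh.symm)
        | simp

-- Replicates over strictly increasing keys concatenate to a weakly sorted list.
theorem pvPairwise_flat (f : Int → Nat) :
    ∀ (ks : List Int), ks.Pairwise (· < ·) →
      (ks.flatMap (fun w => List.replicate (f w) w)).Pairwise (· ≤ ·) := by
  intro ks
  induction ks with
  | nil => simp
  | cons w ks ih =>
    intro hp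
    rw [List.flatMap_cons, List.pairwise_append]
    rcases List.pairwise_cons.1 hp with ⟨hlt, htail⟩
    refine ⟨List.pairwise_replicate.2 (by simp), ih htail, ?_⟩
    intro x hx y hy
    rcases List.mem_flatMap.1 hy with ⟨w', hw', hy'⟩
    have := List.eq_of_mem_replicate hx
    have := List.eq_of_mem_replicate hy'
    subst_vars
    exact le_of_lt (hlt _ hw')

-- The sorted list is the ascending distinct weights, each replicated by its multiplicity.
theorem pvSorted_eq_flat (weight : List Int) :
    PySem.List.sorted weight (fun x => x) false =
      (PySem.List.sorted (PySem.Set.ofList weight) (fun x => x) false).flatMap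
        (fun w => List.replicate ((weight.count w : Int)).toNat w) := by
  set ks := PySem.List.sorted (PySem.Set.ofList weight) (fun x => x) false with hks
  have hplt : ks.Pairwise (· < ·) := PySem.List.sorted_ofList_pairwise_lt weight
  have hnd : ks.Nodup := hplt.nodup
  have hmem : ∀ v, v ∈ ks ↔ v ∈ weight := by
    intro v
    rw [hks, PySem.List.mem_sorted, PySem.Set.mem_ofList]
  have hsimp : (fun w => List.replicate ((weight.count w : Int)).toNat w)
      = fun w => List.replicate (weight.count w) w := by
    funext w; simp
  rw [hsimp]
  have hperm : (ks.flatMap (fun w => List.replicate (weight.count w) w)).Perm weight := by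
    refine List.perm_iff_count.2 (fun v => ?_)
    rw [pvCount_flat _ v ks hnd]
    by_cases hv : v ∈ weight
    · simp [(hmem v).2 hv]
    · simp [List.count_eq_zero_of_not_mem hv]
  have hpw : (ks.flatMap (fun w => List.replicate (weight.count w) w)).Pairwise (· ≤ ·) :=
    pvPairwise_flat _ ks hplt
  exact PySem.List.sorted_id_eq_of_perm_of_pairwise _ _ hperm hpw

-- ===== VERDICT (by name: the statement is the Claim_ definition above) =====
theorem maxNumberOfApplesDS1_spec : Claim_equal_maxNumberOfApplesDS1 := by
  intro weight _
  unfold Spec_maxNumberOfApplesDS1 maxNumberOfApplesDS1 maxNumberOfApplesDS1_alt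
  have hcounter : weight.foldl (fun d x => d.insert x (d.getD x 0 + 1)) PySem.Dict.empty
      = PySem.Dict.counter weight := PySem.Dict.foldl_insert_getD_add_one_eq_counter weight
  rw [hcounter]
  show pvALoop _ 0 0
      = pvBLoop _ (PySem.List.sorted (PySem.Dict.counter weight).keys (fun x => x) false) 0 0
  rw [PySem.Dict.keys_counter, pvSorted_eq_flat weight]
  exact pvLoop_eq (fun w => (weight.count w : Int)) _
    (fun w => PySem.Dict.getD_counter weight w) _ 0 0
    (fun w _ => by positivity) (by norm_num)
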